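-- pv_equiv track=rewrite | github.com/StopSoo/PS | Programmers/Lv.1/Py/덧칠하기.py | solution
-- ===== SOURCE A (Python) =====
-- def solution(n, m, section):
--     answer = 0
--     last_painted = section[0] - 1 # 마지막으로 칠해진 구역의 끝 번호 저장하기 (!)
--
--     for s in section:
--         if s <= last_painted: continue
--         else:
--             answer += 1
--             last_painted = s + (m - 1)
--
--     return answer
-- ===== SOURCE B (Python) =====
-- def solution(n, m, section):
--     answer = 0
--     remaining = section
--     while remaining:
--         cover = remaining[0] + m - 1
--         answer += 1
--         remaining = [s for s in remaining[1:] if s > cover]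
--     return answer
-- ===== Notes on version B (the rewrite author's own statement) =====
-- stated objective: alternative
-- what changed: A makes one pass keeping a last_painted state and a continue guard; B has no per-element state: each stroke it takes the head of the remaining list, then rebuilds the remaining list by a whole-list filter comprehension dropping every section that stroke covers (staged filtering passes instead of a single stateful scan).
-- outside the precondition, e.g. on solution(3, -5, [10, 5, 3]): A returns 3, B returns 2; on solution(3, 0, [10, 5, 3]): A returns 1, B returns 1
import Mathlib
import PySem

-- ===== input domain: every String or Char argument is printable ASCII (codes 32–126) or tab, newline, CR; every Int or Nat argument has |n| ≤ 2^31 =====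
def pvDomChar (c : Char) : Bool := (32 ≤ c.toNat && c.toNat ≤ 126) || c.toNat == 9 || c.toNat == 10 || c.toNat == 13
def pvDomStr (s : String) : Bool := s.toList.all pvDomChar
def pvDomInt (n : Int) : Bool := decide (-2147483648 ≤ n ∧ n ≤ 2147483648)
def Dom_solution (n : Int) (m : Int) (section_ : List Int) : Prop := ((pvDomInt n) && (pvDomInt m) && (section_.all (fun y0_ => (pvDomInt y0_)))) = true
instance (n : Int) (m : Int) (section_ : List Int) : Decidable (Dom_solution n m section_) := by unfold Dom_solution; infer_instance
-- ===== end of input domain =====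

-- B replaces A's single stateful pass (last_painted + continue) by per-stroke whole-list
-- filtering: take the head, drop everything that stroke covers, repeat; return values agree
-- on the natural domain (nonempty section, stroke width m ≥ 1).

-- ===== PORT A =====
-- for s in section: if s <= last_painted: continue else: answer += 1; last_painted = s+(m-1)
def solutionStep (m : Int) (st : Int × Int) (s : Int) : Int × Int :=
  if s ≤ st.2 then st else (st.1 + 1, s + (m - 1))

def solution (n : Int) (m : Int) (section_ : List Int) : Int :=
  -- section[0] raises on []; excluded by Pre_solution (getD default is never used there)
  let last_painted := (PySem.List.pyGet? section_ 0).getD 0 - 1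
  (section_.foldl (solutionStep m) (0, last_painted)).1

-- ===== PORT B =====
-- while remaining: cover = remaining[0]+m-1; answer += 1; remaining = [s for s in remaining[1:] if s > cover]
def altLoop (m : Int) (answer : Int) : List Int → Int
  | [] => answer
  | s :: rest => altLoop m (answer + 1) (rest.filter (fun x => decide (s + (m - 1) < x)))
termination_by l => l.length
decreasing_by
  simp only [List.length_unattach]
  exact Nat.lt_succ_of_le (Nat.le_trans (List.length_filter_le _ _) (by simp))

def solution_alt (n : Int) (m : Int) (section_ : List Int) : Int :=
  altLoop m 0 section_

-- ===== PRECONDITION & SPEC =====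
-- Pre_ restricts to the problem's natural domain: 1 ≤ m (the statement guarantees
-- 1 ≤ m ≤ n; for m ≤ 0 a "stroke" covers nothing and A's value there is an artefact
-- of its leftover last_painted state) and a nonempty section list (A raises
-- IndexError at section[0] on []).
def Pre_solution (n : Int) (m : Int) (section_ : List Int) : Prop := 1 ≤ m ∧ section_ ≠ []
instance (n : Int) (m : Int) (section_ : List Int) : Decidable (Pre_solution n m section_) := by unfold Pre_solution; infer_instance
def pvWitness_solution : Int × Int × List Int := (8, 4, [2, 3, 6])

def Spec_solution (n : Int) (m : Int) (section_ : List Int) (out : Int) : Prop := out = solution_alt n m section_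
instance (n : Int) (m : Int) (section_ : List Int) (out : Int) : Decidable (Spec_solution n m section_ out) := by unfold Spec_solution; infer_instance

-- ===== CLAIM (what is proved, stated in full; the proofs are below) =====
def Claim_equal_solution : Prop := ∀ (n : Int) (m : Int) (section_ : List Int), Dom_solution n m section_ → Pre_solution n m section_ → Spec_solution n m section_ (solution n m section_)

-- ===== LEMMAS AND PROOFS =====

-- Invariant: with m ≥ 1, A's fold from state (ans, e) computes what B's loop computes
-- on the list filtered by e.  The key point is that, for m ≥ 1, each new cover
-- c = s + m - 1 satisfies e ≤ c, so filtering by e and then by c is filtering by c.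
theorem foldl_eq_altLoop (m : Int) (hm : 1 ≤ m) (l : List Int) : ∀ (ans e : Int),
    (l.foldl (solutionStep m) (ans, e)).1
      = altLoop m ans (l.filter (fun x => decide (e < x))) := by
  induction l with
  | nil => intro ans e; simp [altLoop]
  | cons s rest ih =>
    intro ans e
    by_cases h : s ≤ e
    · have hd : decide (e < s) = false := decide_eq_false (by omega)
      simp only [List.foldl_cons, solutionStep, if_pos h, List.filter_cons, hd,
        Bool.false_eq_true, if_false]
      exact ih ans e
    · have hd : decide (e < s) = true := decide_eq_true (by omega)
      simp only [List.foldl_cons, solutionStep, if_neg h, List.filter_cons, hd, if_true, altLoop]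
      rw [ih (ans + 1) (s + (m - 1)), List.filter_filter]
      congr 1
      apply List.filter_congr
      intro x _
      by_cases hx : s + (m - 1) < x
      · rw [decide_eq_true hx, decide_eq_true (show e < x by omega), Bool.and_self]
      · rw [decide_eq_false hx, Bool.false_and]

-- ===== VERDICT (by name: the statement is the Claim_ definition above) =====
theorem solution_spec : Claim_equal_solution := by
  intro n m section_ _dom hpre
  obtain ⟨hm, hne⟩ := hpre
  unfold Spec_solution solution solution_alt
  cases section_ with
  | nil => exact absurd rfl hne
  | cons s rest =>
    have hget : PySem.List.pyGet? (s :: rest) 0 = some s := by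
      simp [PySem.List.pyGet?, PySem.List.pyIdx?]
    simp only [hget, Option.getD_some]
    rw [foldl_eq_altLoop m hm]
    -- both sides: first stroke at s, remaining lists coincide since s-1 ≤ s+(m-1)
    have hd : decide ((s : Int) - 1 < s) = true := decide_eq_true (by omega)
    simp only [List.filter_cons, hd, if_true, altLoop, List.filter_filter]
    congr 1
    apply List.filter_congr
    intro x _
    by_cases hx : s + (m - 1) < x
    · rw [decide_eq_true hx, decide_eq_true (show s - 1 < x by omega), Bool.and_self]
    · rw [decide_eq_false hx, Bool.false_and]
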